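-- pv_equiv track=rewrite | github.com/fubak/randosite | scripts/topic_page_generator.py | matches_topic_source
-- ===== SOURCE A (Python) =====
-- from typing import List, Dict, Set, Optional
--
-- def matches_topic_source(source: str, prefixes: List[str]) -> bool:
--     """
--     Check if a source matches any of the topic's source prefixes.
--
--     Args:
--         source: Source name (e.g., 'hackernews', 'tech_verge')
--         prefixes: List of prefixes to match (e.g., ['hackernews', 'tech_'])
--
--     Returns:
--         True if source matches any prefix, False otherwise
--
--     Note:
--         Prefixes ending with '_' use startswith matching,
--         others use exact matching.
--     """
--     for prefix in prefixes:
--         if prefix.endswith('_'):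
--             # Prefix matching: 'tech_' matches 'tech_verge', 'tech_wired'
--             if source.startswith(prefix):
--                 return True
--         else:
--             # Exact matching: 'hackernews' only matches 'hackernews'
--             if source == prefix:
--                 return True
--     return False
-- ===== SOURCE B (Python) =====
-- def matches_topic_source(source, prefixes):
--     # Invert the matching: compute, from source alone, the full set of
--     # patterns that could match it — source itself plus every prefix of
--     # source ending in '_' — then test each rule for membership.
--     candidates = {source[:i] for i in range(1, len(source) + 1) if source[i - 1] == '_'}
--     candidates.add(source)
--     return any(p in candidates for p in prefixes)
-- ===== Notes on version B (the rewrite author's own statement) =====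
-- stated objective: alternative
-- what changed: B inverts the matching direction: instead of testing each rule against the source with endswith/startswith branching, it derives from the source alone the complete candidate set of rules that could match it (the source itself plus every prefix of the source ending in '_') and then checks each rule for membership in that set.
import Mathlib
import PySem

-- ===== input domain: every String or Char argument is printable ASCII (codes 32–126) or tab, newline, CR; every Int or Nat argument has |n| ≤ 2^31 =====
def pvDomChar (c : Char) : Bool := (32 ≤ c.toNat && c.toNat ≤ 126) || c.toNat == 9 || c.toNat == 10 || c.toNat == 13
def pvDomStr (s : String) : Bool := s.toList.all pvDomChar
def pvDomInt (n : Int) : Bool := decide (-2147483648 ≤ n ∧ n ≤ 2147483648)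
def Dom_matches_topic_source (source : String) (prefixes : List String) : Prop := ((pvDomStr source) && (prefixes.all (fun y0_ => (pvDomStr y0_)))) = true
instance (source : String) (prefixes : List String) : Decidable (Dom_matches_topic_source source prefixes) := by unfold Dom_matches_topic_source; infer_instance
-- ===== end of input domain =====

-- B inverts the matching: it derives from `source` alone the full candidate set of patterns that
-- could match it (source itself plus every prefix of source ending in '_') and then tests each
-- rule for membership in that set; a different algorithm, no speed claim.

-- ===== PORT A =====
-- A: one loop over the rules; per rule, endswith('_') chooses startswith vs exact, early return.
def matches_topic_source (source : String) (prefixes : List String) : Bool :=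
  match prefixes with
  | [] => false
  | p :: rest =>
    if PySem.Str.endswith p "_" then
      if PySem.Str.startswith source p then true else matches_topic_source source rest
    else
      if source == p then true else matches_topic_source source rest

-- ===== PORT B =====
-- B: build the candidate set {source[:i] | 1 ≤ i ≤ len(source), source[i-1] = '_'} ∪ {source},
-- then check each rule for membership in it.
def matches_topic_source_alt (source : String) (prefixes : List String) : Bool :=
  let cand := (PySem.List.pyRange 1 ((PySem.Str.len source : Int) + 1) 1).foldl
    (fun (acc : PySem.Set String) i =>
      if PySem.Str.pyGet? source (i - 1) == some '_' then
        PySem.Set.add acc (PySem.Str.slice source none (some i))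
      else acc)
    PySem.Set.empty
  prefixes.any (fun p => PySem.Set.contains (PySem.Set.add cand source) p)

-- ===== PRECONDITION & SPEC =====
def Spec_matches_topic_source (source : String) (prefixes : List String) (out : Bool) : Prop := out = matches_topic_source_alt source prefixes
instance (source : String) (prefixes : List String) (out : Bool) : Decidable (Spec_matches_topic_source source prefixes out) := by unfold Spec_matches_topic_source; infer_instance

-- ===== CLAIM (what is proved, stated in full; the proofs are below) =====
def Claim_equal_matches_topic_source : Prop := ∀ (source : String) (prefixes : List String), Dom_matches_topic_source source prefixes → Spec_matches_topic_source source prefixes (matches_topic_source source prefixes)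

-- ===== LEMMAS AND PROOFS =====

-- the per-rule test A implements
def pvTest (source p : String) : Bool :=
  if PySem.Str.endswith p "_" then PySem.Str.startswith source p else source == p

lemma matchesA_eq_any (source : String) (prefixes : List String) :
    matches_topic_source source prefixes = prefixes.any (pvTest source) := by
  induction prefixes with
  | nil => rfl
  | cons p rest ih =>
    simp only [matches_topic_source, List.any_cons, pvTest, ih]
    split_ifs <;> simp_all

lemma contains_add (s : PySem.Set String) (x q : String) :
    PySem.Set.contains (PySem.Set.add s x) q = (PySem.Set.contains s q || q == x) := by
  simp [PySem.Set.add, PySem.Set.contains]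
  by_cases h : x ∈ s
  · by_cases hq : q = x <;> simp [h, hq]
  · simp [h]
    by_cases hq : q = x <;> simp [hq]

-- membership in B's candidate set after folding the building loop, from any accumulator
lemma contains_foldl (source q : String) (l : List Int) (acc : PySem.Set String) :
    PySem.Set.contains (l.foldl
      (fun (acc : PySem.Set String) i =>
        if PySem.Str.pyGet? source (i - 1) == some '_' then
          PySem.Set.add acc (PySem.Str.slice source none (some i))
        else acc) acc) q
    = (PySem.Set.contains acc q ||
       l.any (fun i => (PySem.Str.pyGet? source (i - 1) == some '_')
                        && (q == PySem.Str.slice source none (some i)))) := by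
  induction l generalizing acc with
  | nil => simp
  | cons i rest ih =>
    simp only [List.foldl_cons, List.any_cons, ih]
    by_cases h : PySem.Str.pyGet? source (i - 1) == some '_'
    · simp only [h, if_pos, contains_add]
      cases hq : (q == PySem.Str.slice source none (some i)) <;>
        cases PySem.Set.contains acc q <;> simp_all
    · have hb : (PySem.Str.pyGet? source (i - 1) == some '_') = false := by
        simpa using h
      simp only [hb, Bool.false_eq_true, if_false, Bool.false_and, Bool.false_or]

-- the heart of the equivalence, on character lists: A's per-rule test holds iff the rule is
-- source itself or a prefix of source ending in '_'
lemma key (s q : List Char) :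
    (if ['_'] <:+ q then q <+: s else q = s)
    ↔ ((∃ k : ℕ, k < s.length ∧ s[k]? = some '_' ∧ q = s.take (k + 1)) ∨ q = s) := by
  by_cases hq : ['_'] <:+ q
  · simp only [hq, if_pos]
    constructor
    · intro hpre
      obtain ⟨t, ht⟩ := hq
      have hlen : q.length = t.length + 1 := by simp [← ht]
      have hql : q.length ≤ s.length := hpre.length_le
      have htake : s.take q.length = q := (List.prefix_iff_eq_take.mp hpre).symm
      left
      refine ⟨t.length, by omega, ?_, ?_⟩
      · have h1 : q[t.length]? = some '_' := by
          rw [← ht]; simp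
        have h2 : (s.take q.length)[t.length]? = s[t.length]? := by
          apply List.getElem?_take_of_lt; omega
        rw [htake] at h2
        rw [← h2, h1]
      · rw [← hlen, htake]
    · rintro (⟨k, hk, _, hqtake⟩ | rfl)
      · rw [hqtake]; exact List.take_prefix _ _
      · exact List.prefix_refl _
  · simp only [hq, if_neg, not_false_iff]
    constructor
    · rintro rfl; right; rfl
    · rintro (⟨k, hk, hget, hqtake⟩ | rfl)
      · exfalso; apply hq
        have : s.take (k + 1) = s.take k ++ [s[k]] := List.take_succ_eq_append_getElem (by omega)
        rw [hqtake, this]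
        have h95 : s[k] = '_' := by
          have := List.getElem?_eq_getElem (l := s) (i := k) (by omega)
          rw [this] at hget; exact Option.some_injective _ hget
        rw [h95]
        exact ⟨s.take k, rfl⟩
      · rfl

lemma slice_take (source : String) (k : ℕ) :
    (PySem.Str.slice source none (some ((k : Int) + 1))).toList = source.toList.take (k + 1) := by
  simp only [PySem.Str.toList_slice, PySem.Chars.slice_eq_listSlice]
  rw [show ((k : Int) + 1) = ((k + 1 : ℕ) : Int) by push_cast; ring]
  exact PySem.List.slice_to_natCast source.toList (k + 1)

-- A's per-rule test equals B's membership test in the candidate set, rule by rule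
lemma per_prefix (source p : String) :
    pvTest source p
    = ((PySem.List.pyRange 1 ((PySem.Str.len source : Int) + 1) 1).any
        (fun i => (PySem.Str.pyGet? source (i - 1) == some '_')
                   && (p == PySem.Str.slice source none (some i)))
       || (p == source)) := by
  rw [Bool.eq_iff_iff]
  have hL : pvTest source p = true ↔
      (if ['_'] <:+ p.toList then p.toList <+: source.toList else p.toList = source.toList) := by
    unfold pvTest
    by_cases he : ['_'] <:+ p.toList
    · have h1 : PySem.Str.endswith p "_" = true := by
        simp [PySem.Chars.endswith_iff, he]
      rw [if_pos h1, if_pos he]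
      simp [PySem.Chars.startswith_iff]
    · have h1 : ¬ PySem.Str.endswith p "_" = true := by
        simpa [PySem.Chars.endswith_iff] using he
      rw [if_neg h1, if_neg he]
      simp only [beq_iff_eq]
      exact ⟨fun h => by rw [h], fun h => (String.toList_inj.mp h).symm⟩
  rw [hL, key source.toList p.toList]
  simp only [Bool.or_eq_true, List.any_eq_true, PySem.List.mem_pyRange_one, Bool.and_eq_true,
    beq_iff_eq, PySem.Str.len_eq, String.length_toList]
  constructor
  · rintro (⟨k, hk, hget, htake⟩ | hqs)
    · left
      refine ⟨(k : Int) + 1, ⟨by omega, by omega⟩, ?_, ?_⟩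
      · simpa using hget
      · apply String.toList_inj.mp
        rw [slice_take, htake]
    · right; exact String.toList_inj.mp hqs
  · rintro (⟨i, ⟨h1, h2⟩, hget, hslice⟩ | rfl)
    · left
      obtain ⟨k, rfl⟩ : ∃ k : ℕ, i = (k : Int) + 1 := ⟨(i - 1).toNat, by omega⟩
      refine ⟨k, by omega, ?_, ?_⟩
      · simpa using hget
      · rw [hslice]
        exact slice_take source k
    · right; rfl

-- ===== VERDICT (by name: the statement is the Claim_ definition above) =====
theorem matches_topic_source_spec : Claim_equal_matches_topic_source := by
  intro source prefixes _
  unfold Spec_matches_topic_source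
  rw [matchesA_eq_any]
  simp only [matches_topic_source_alt]
  refine congrArg prefixes.any (funext fun p => ?_)
  rw [per_prefix, contains_add, contains_foldl]
  simp [PySem.Set.contains, PySem.Set.empty]
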